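-- pv_equiv track=rewrite | github.com/wilmurillo-ai/Design-Assistant | .skills/openclaw-skills/skills/aico233/hr-workforce-dashboard/scripts/build_dashboard_bundle.py | build_grouped_header_rows
-- ===== SOURCE A (Python) =====
-- def build_grouped_header_rows(columns: list[str]) -> tuple[list[str], list[str]]:
--     top_row: list[str] = []
--     second_row: list[str] = []
--     previous_group = None
--     for column in columns:
--         if column in {"Region", "Country/Territory"}:
--             top_row.append(column)
--             second_row.append("")
--             previous_group = None
--             continue
--         group, suffix = column.rsplit(" ", 1)
--         display_group = "合计" if group == "Total" else group
--         top_row.append(display_group if display_group != previous_group else "")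
--         second_row.append("Regular" if suffix == "R" else "Intern")
--         previous_group = display_group
--     return top_row, second_row
-- ===== SOURCE B (Python) =====
-- from itertools import groupby
--
-- _SPECIAL = {"Region", "Country/Territory"}
--
--
-- def _display_group(column: str) -> str:
--     group, _suffix = column.rsplit(" ", 1)
--     return "合计" if group == "Total" else group
--
--
-- def build_grouped_header_rows(columns: list[str]) -> tuple[list[str], list[str]]:
--     top_row: list[str] = []
--     second_row: list[str] = []
--     # Group consecutive columns by display group; each special column gets a
--     # fresh object() key so it is always its own run (and breaks normal runs).
--     for key, run_iter in groupby(columns, key=lambda c: object() if c in _SPECIAL else _display_group(c)):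
--         run = list(run_iter)
--         if run[0] in _SPECIAL:
--             top_row.append(run[0])
--             second_row.append("")
--         else:
--             top_row.append(key)
--             top_row.extend("" for _ in run[1:])
--             second_row.extend("Regular" if c.rsplit(" ", 1)[1] == "R" else "Intern" for c in run)
--     return top_row, second_row
-- ===== Notes on version B (the rewrite author's own statement) =====
-- stated objective: alternative
-- what changed: Replaced the stateful previous_group loop by an itertools.groupby pass that groups consecutive columns into runs by display-group key (fresh object() keys keep special columns as singleton runs) and emits each run's header cells at once.
import Mathlib
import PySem

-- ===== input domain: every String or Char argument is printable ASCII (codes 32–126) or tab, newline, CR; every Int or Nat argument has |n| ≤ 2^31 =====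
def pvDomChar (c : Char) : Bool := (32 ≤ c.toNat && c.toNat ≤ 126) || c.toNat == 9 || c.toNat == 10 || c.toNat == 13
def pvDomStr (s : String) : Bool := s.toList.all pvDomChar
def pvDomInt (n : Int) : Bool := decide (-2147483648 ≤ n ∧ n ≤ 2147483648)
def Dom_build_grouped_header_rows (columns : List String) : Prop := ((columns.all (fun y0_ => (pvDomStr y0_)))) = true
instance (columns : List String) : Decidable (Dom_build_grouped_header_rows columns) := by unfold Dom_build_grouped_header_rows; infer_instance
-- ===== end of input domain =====

-- B rewrites A's stateful previous_group loop as a groupby-style run-grouping pass (alternative decomposition, same cost); return values proved equal on all inputs where A returns.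

-- ===== PORT A =====
-- column.rsplit(" ", 1) when at least one space is present; on a space-free
-- string Python raises ValueError (excluded by Pre_), here we return ("", s).
def pvRsplitSpace (s : String) : String × String :=
  match s.toList.reverse.span (fun c => c ≠ ' ') with
  | (suffRev, rest) =>
    match rest with
    | [] => ("", s)
    | _ :: groupRev => (String.ofList groupRev.reverse, String.ofList suffRev.reverse)

def pvStepA (st : List String × List String × Option String) (column : String) :
    List String × List String × Option String :=
  let top_row := st.1
  let second_row := st.2.1
  let previous_group := st.2.2
  if column = "Region" ∨ column = "Country/Territory" then
    (top_row ++ [column], second_row ++ [""], none)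
  else
    let gs := pvRsplitSpace column
    let group := gs.1
    let suffix := gs.2
    let display_group := if group = "Total" then "合计" else group
    (top_row ++ [if some display_group ≠ previous_group then display_group else ""],
     second_row ++ [if suffix = "R" then "Regular" else "Intern"],
     some display_group)

def build_grouped_header_rows (columns : List String) : List String × List String :=
  let st := columns.foldl pvStepA ([], [], none)
  (st.1, st.2.1)

-- ===== PORT B =====
def pvDisplay (column : String) : String :=
  let group := (pvRsplitSpace column).1
  if group = "Total" then "合计" else group

-- groupby key: none for a special column (never merges, like a fresh object()),
-- some display_group otherwise.
def pvKeyB (c : String) : Option String :=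
  if c = "Region" ∨ c = "Country/Territory" then none else some (pvDisplay c)

def pvTakeRun (k : String) : List String → List String × List String
  | [] => ([], [])
  | c :: rest =>
    if pvKeyB c = some k then
      let p := pvTakeRun k rest
      (c :: p.1, p.2)
    else ([], c :: rest)

theorem pvTakeRun_len (k : String) (l : List String) : (pvTakeRun k l).2.length ≤ l.length := by
  induction l with
  | nil => simp [pvTakeRun]
  | cons c rest ih =>
    simp only [pvTakeRun]
    split
    · exact Nat.le_succ_of_le ih
    · simp

-- the runs produced by itertools.groupby with the key above
def pvGroups : List String → List (List String)
  | [] => []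
  | c :: rest =>
    match pvKeyB c with
    | none => [c] :: pvGroups rest
    | some k =>
      let p := pvTakeRun k rest
      (c :: p.1) :: pvGroups p.2
termination_by l => l.length
decreasing_by
  · simp
  · exact Nat.lt_succ_of_le (pvTakeRun_len _ _)

def pvStepB (acc : List String × List String) (run : List String) : List String × List String :=
  match run with
  | [] => acc
  | c :: rest =>
    if c = "Region" ∨ c = "Country/Territory" then
      (acc.1 ++ [c], acc.2 ++ [""])
    else
      (acc.1 ++ [pvDisplay c] ++ rest.map (fun _ => ""),
       acc.2 ++ (c :: rest).map (fun x => if (pvRsplitSpace x).2 = "R" then "Regular" else "Intern"))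

def build_grouped_header_rows_alt (columns : List String) : List String × List String :=
  (pvGroups columns).foldl pvStepB ([], [])

-- ===== PRECONDITION & SPEC =====
-- Pre_ excludes exactly the inputs on which Python A raises ValueError:
-- a non-special column containing no space makes rsplit(" ", 1) yield one part.
def Pre_build_grouped_header_rows (columns : List String) : Prop :=
  ∀ c ∈ columns, c = "Region" ∨ c = "Country/Territory" ∨ ' ' ∈ c.toList
instance (columns : List String) : Decidable (Pre_build_grouped_header_rows columns) := by
  unfold Pre_build_grouped_header_rows; infer_instance

def pvWitness_build_grouped_header_rows : List String :=
  ["Region", "Country/Territory", "Total R", "Total I", "Eng R", "Eng I"]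

def Spec_build_grouped_header_rows (columns : List String) (out : List String × List String) : Prop := out = build_grouped_header_rows_alt columns
instance (columns : List String) (out : List String × List String) : Decidable (Spec_build_grouped_header_rows columns out) := by unfold Spec_build_grouped_header_rows; infer_instance

-- ===== CLAIM (what is proved, stated in full; the proofs are below) =====
def Claim_equal_build_grouped_header_rows : Prop := ∀ (columns : List String), Dom_build_grouped_header_rows columns → Pre_build_grouped_header_rows columns → Spec_build_grouped_header_rows columns (build_grouped_header_rows columns)

-- ===== LEMMAS AND PROOFS =====

def pvCell2 (c : String) : String :=
  if (pvRsplitSpace c).2 = "R" then "Regular" else "Intern"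

-- A's loop as a structural recursion returning (top, second, final previous_group)
def goA : Option String → List String → List String × List String × Option String
  | p, [] => ([], [], p)
  | p, c :: rest =>
    if c = "Region" ∨ c = "Country/Territory" then
      let r := goA none rest
      (c :: r.1, "" :: r.2.1, r.2.2)
    else
      let dg := pvDisplay c
      let r := goA (some dg) rest
      ((if some dg ≠ p then dg else "") :: r.1, pvCell2 c :: r.2.1, r.2.2)

theorem foldA_eq (cols : List String) : ∀ (t s : List String) (p : Option String),
    cols.foldl pvStepA (t, s, p) = (t ++ (goA p cols).1, s ++ (goA p cols).2.1, (goA p cols).2.2) := by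
  induction cols with
  | nil => intro t s p; simp [goA]
  | cons c rest ih =>
    intro t s p
    by_cases h : c = "Region" ∨ c = "Country/Territory"
    · simp [List.foldl, pvStepA, h, ih, goA]
    · simp [List.foldl, pvStepA, h, ih, goA, pvDisplay, pvCell2]

-- B's fold contribution of a single run
def pvEmit1 : List String → List String × List String
  | [] => ([], [])
  | c :: rest =>
    if c = "Region" ∨ c = "Country/Territory" then ([c], [""])
    else ([pvDisplay c] ++ rest.map (fun _ => ""), (c :: rest).map pvCell2)

def emitB : List (List String) → List String × List String
  | [] => ([], [])
  | g :: gs =>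
    let e := pvEmit1 g
    let r := emitB gs
    (e.1 ++ r.1, e.2 ++ r.2)

theorem foldB_eq (gs : List (List String)) : ∀ (t s : List String),
    gs.foldl pvStepB (t, s) = (t ++ (emitB gs).1, s ++ (emitB gs).2) := by
  induction gs with
  | nil => intro t s; simp [emitB]
  | cons g gs ih =>
    intro t s
    have hstep : pvStepB (t, s) g = (t ++ (pvEmit1 g).1, s ++ (pvEmit1 g).2) := by
      cases g with
      | nil => simp [pvStepB, pvEmit1]
      | cons c rest =>
        by_cases h : c = "Region" ∨ c = "Country/Territory"
        · simp [pvStepB, pvEmit1, h]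
        · simp [pvStepB, pvEmit1, h, pvCell2]
    simp [List.foldl, hstep, ih, emitB]

theorem pvKeyB_some {c k : String} (h : pvKeyB c = some k) :
    ¬(c = "Region" ∨ c = "Country/Territory") ∧ pvDisplay c = k := by
  unfold pvKeyB at h
  split at h
  · simp at h
  · exact ⟨by assumption, by simpa using h⟩

theorem pvTakeRun_split (k : String) (l : List String) :
    (pvTakeRun k l).1 ++ (pvTakeRun k l).2 = l ∧
    (∀ c ∈ (pvTakeRun k l).1, pvKeyB c = some k) ∧
    (∀ c, ((pvTakeRun k l).2).head? = some c → pvKeyB c ≠ some k) := by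
  induction l with
  | nil => simp [pvTakeRun]
  | cons c rest ih =>
    by_cases h : pvKeyB c = some k
    · simp only [pvTakeRun, if_pos h]
      refine ⟨by simpa using ih.1, ?_, ih.2.2⟩
      intro x hx
      rcases List.mem_cons.mp hx with hx | hx
      · exact hx ▸ h
      · exact ih.2.1 x hx
    · simp only [pvTakeRun, if_neg h]
      refine ⟨rfl, by simp, ?_⟩
      intro x hx
      have hxc : c = x := by simpa using hx
      exact hxc ▸ h

-- consuming a run whose elements all share key k, starting with prev = some k:
theorem goA_run (k : String) (rs : List String) :
    ∀ (r : List String), (∀ c ∈ r, pvKeyB c = some k) →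
    goA (some k) (r ++ rs) =
      (r.map (fun _ => "") ++ (goA (some k) rs).1,
       r.map pvCell2 ++ (goA (some k) rs).2.1,
       (goA (some k) rs).2.2) := by
  intro r
  induction r with
  | nil => intro _; simp
  | cons c r ih =>
    intro hall
    have hc := pvKeyB_some (hall c (List.mem_cons_self))
    have hrest := ih (fun x hx => hall x (List.mem_cons_of_mem _ hx))
    simp only [List.cons_append, goA, if_neg hc.1, hc.2, hrest]
    simp

def pvOk (p : Option String) (cols : List String) : Prop :=
  ∀ c, cols.head? = some c → (c = "Region" ∨ c = "Country/Territory") ∨ some (pvDisplay c) ≠ p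

theorem main_eq : ∀ (n : Nat) (cols : List String) (p : Option String), cols.length ≤ n →
    pvOk p cols → emitB (pvGroups cols) = ((goA p cols).1, (goA p cols).2.1) := by
  intro n
  induction n with
  | zero =>
    intro cols p hlen _
    have : cols = [] := List.eq_nil_of_length_eq_zero (Nat.le_zero.mp hlen)
    subst this; simp [pvGroups, emitB, goA]
  | succ n ih =>
    intro cols p hlen hok
    cases cols with
    | nil => simp [pvGroups, emitB, goA]
    | cons c rest =>
      by_cases hsp : c = "Region" ∨ c = "Country/Territory"
      · have hk : pvKeyB c = none := by simp [pvKeyB, hsp]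
        have hok' : pvOk none rest := by
          intro x hx
          by_cases hxs : x = "Region" ∨ x = "Country/Territory"
          · exact Or.inl hxs
          · exact Or.inr (by simp)
        have hrec := ih rest none (Nat.le_of_succ_le_succ hlen) hok'
        simp only [pvGroups, hk]
        simp [emitB, pvEmit1, hrec, goA, if_pos hsp]
      · have hk : pvKeyB c = some (pvDisplay c) := by simp [pvKeyB, hsp]
        set k := pvDisplay c with hkdef
        obtain ⟨hsplit, hallk, hhead⟩ := pvTakeRun_split k rest
        have hne : some k ≠ p := by
          rcases hok c rfl with h | h
          · exact absurd h hsp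
          · exact h
        have hok' : pvOk (some k) (pvTakeRun k rest).2 := by
          intro x hx
          by_cases hxs : x = "Region" ∨ x = "Country/Territory"
          · exact Or.inl hxs
          · right
            intro hcontra
            apply hhead x hx
            simp [pvKeyB, hxs]
            exact (Option.some_inj.mp hcontra)
        have hlen' : (pvTakeRun k rest).2.length ≤ n :=
          Nat.le_trans (pvTakeRun_len k rest) (Nat.le_of_succ_le_succ hlen)
        have hrec := ih (pvTakeRun k rest).2 (some k) hlen' hok'
        have hrun := goA_run k (pvTakeRun k rest).2 (pvTakeRun k rest).1 hallk
        simp only [pvGroups, hk]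
        simp only [emitB, pvEmit1, if_neg hsp]
        have hgoA : goA p (c :: rest) =
            ((if some k ≠ p then k else "") :: (goA (some k) rest).1,
             pvCell2 c :: (goA (some k) rest).2.1,
             (goA (some k) rest).2.2) := by
          simp [goA, if_neg hsp, hkdef]
        rw [hsplit] at hrun
        rw [hrec, hgoA, if_pos hne, hrun]
        simp [← hkdef]
  -- end

-- ===== VERDICT (by name: the statement is the Claim_ definition above) =====
theorem build_grouped_header_rows_spec : Claim_equal_build_grouped_header_rows := by
  intro columns _ _
  unfold Spec_build_grouped_header_rows build_grouped_header_rows build_grouped_header_rows_alt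
  have hA := foldA_eq columns [] [] none
  have hB := foldB_eq (pvGroups columns) [] []
  have hok : pvOk none columns := by
    intro c hc
    by_cases hs : c = "Region" ∨ c = "Country/Territory"
    · exact Or.inl hs
    · exact Or.inr (by simp)
  have hmain := main_eq columns.length columns none (Nat.le_refl _) hok
  simp only [hA, hB, hmain, List.nil_append]
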